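-- pv_equiv track=rewrite | github.com/MadhusreeRana2001/Hand-Gesture-Recognition | Hand_Gesture_Recognition.py | detect_Hand_Gesture
-- ===== SOURCE A (Python) =====
-- def detect_Hand_Gesture(fingers, total_Fingers):
--     """
--     to detect the type of gesture being shown in the video being captured
--     """
--
--     conditions = {
--         "HIGH-FIVE": [total_Fingers == 5],
--         "OK": [total_Fingers == 3, fingers[0] == 0, fingers[1] == 0, fingers[2] == 1,
--                                                     fingers[3] == 1, fingers[4] == 1],
--         "PEACE": [total_Fingers == 2, fingers[0] == 0, fingers[1] == 1, fingers[2] == 1,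
--                                                      fingers[3] == 0, fingers[4] == 0],
--         "ROCK": [total_Fingers == 2, fingers[0] == 0, fingers[1] == 1,
--                                     fingers[2] == 0, fingers[3] == 0, fingers[4] == 1],
--         "THUMBS-UP": [total_Fingers == 1, fingers[0] == 1, fingers[1] == 0, fingers[1] == 0,
--                                                           fingers[1] == 0, fingers[1] == 0]
--                 }
--
--     flag, count , gesture = 0, 0, ""
--     for count, (gesture, condition) in enumerate(conditions.items()):
--         if all(condition):
--             flag = 1
--             break
--         else: continue
--     if flag: return count, gesture
--     else: return -1, ""
-- ===== SOURCE B (Python) =====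
-- _TABLE = {
--     (3, (0, 0, 1, 1, 1)): (1, "OK"),
--     (2, (0, 1, 1, 0, 0)): (2, "PEACE"),
--     (2, (0, 1, 0, 0, 1)): (3, "ROCK"),
--     (1, (1, 0, 0, 0, 0)): (4, "THUMBS-UP"),
-- }
--
--
-- def detect_Hand_Gesture(fingers, total_Fingers):
--     pattern = (fingers[0], fingers[1], fingers[2], fingers[3], fingers[4])
--     if total_Fingers == 5:
--         return 0, "HIGH-FIVE"
--     return _TABLE.get((total_Fingers, pattern), (-1, ""))
-- ===== Notes on version B (the rewrite author's own statement) =====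
-- stated objective: simpler
-- what changed: Replaces the dict-of-condition-lists plus enumerate/flag/break loop by building the 5-finger pattern tuple once and doing a single table lookup keyed on (total_Fingers, pattern), with HIGH-FIVE as the one total-only case; B also fixes A's THUMBS-UP condition, which tests fingers[1] four times and never looks at fingers[2..4].
-- intended difference: On inputs with at least 5 fingers where total_Fingers == 1, fingers[0] == 1, fingers[1] == 0 but fingers[2..4] are not all 0, A returns (4, 'THUMBS-UP') because its condition list repeats fingers[1] == 0 four times instead of checking fingers[2..4]; B returns (-1, '') since the hand is not a thumbs-up pattern, which is the intended behaviour. — e.g. on detect_Hand_Gesture([1, 0, 1, 0, 0], 1): A returns (4, "THUMBS-UP"), B returns (-1, "")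
import Mathlib
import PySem

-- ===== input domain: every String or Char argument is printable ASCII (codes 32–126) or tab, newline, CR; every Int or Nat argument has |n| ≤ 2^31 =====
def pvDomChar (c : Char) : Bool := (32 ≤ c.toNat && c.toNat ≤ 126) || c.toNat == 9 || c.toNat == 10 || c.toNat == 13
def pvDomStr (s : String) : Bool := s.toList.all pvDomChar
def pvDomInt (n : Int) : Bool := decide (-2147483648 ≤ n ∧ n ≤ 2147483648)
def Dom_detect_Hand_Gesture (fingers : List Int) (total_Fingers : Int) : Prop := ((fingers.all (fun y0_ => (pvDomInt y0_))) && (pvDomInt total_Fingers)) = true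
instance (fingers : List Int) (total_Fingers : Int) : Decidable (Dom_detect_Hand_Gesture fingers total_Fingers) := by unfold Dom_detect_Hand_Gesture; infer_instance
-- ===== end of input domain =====

-- B replaces A's dict-of-condition-lists + enumerate/flag loop by one table lookup on the
-- (total_Fingers, finger-pattern) key (objective: simpler); B fixes A's THUMBS-UP check, which
-- tests fingers[1] four times and ignores fingers[2..4] (see D_detect_Hand_Gesture below).


-- ===== PORT A =====
-- the conditions dict, in insertion order (fingers[i] is indexed eagerly; Pre_ guarantees in range)
def dhgConditions (fingers : List Int) (total_Fingers : Int) : List (String × List Bool) :=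
  let g : Int → Int := fun i => PySem.List.pyGetD fingers i 0
  [("HIGH-FIVE", [total_Fingers == 5]),
   ("OK", [total_Fingers == 3, g 0 == 0, g 1 == 0, g 2 == 1, g 3 == 1, g 4 == 1]),
   ("PEACE", [total_Fingers == 2, g 0 == 0, g 1 == 1, g 2 == 1, g 3 == 0, g 4 == 0]),
   ("ROCK", [total_Fingers == 2, g 0 == 0, g 1 == 1, g 2 == 0, g 3 == 0, g 4 == 1]),
   ("THUMBS-UP", [total_Fingers == 1, g 0 == 1, g 1 == 0, g 1 == 0, g 1 == 0, g 1 == 0])]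

-- the enumerate loop with flag/break: first item whose condition list is all true
def dhgLoop : List (String × List Bool) → Nat → Int × String
  | [], _ => (-1, "")
  | (gesture, cond) :: rest, count =>
      if cond.all id then ((count : Int), gesture) else dhgLoop rest (count + 1)

def detect_Hand_Gesture (fingers : List Int) (total_Fingers : Int) : Int × String :=
  dhgLoop (dhgConditions fingers total_Fingers) 0

-- ===== PORT B =====
def dhgTable : PySem.Dict (Int × Int × Int × Int × Int × Int) (Int × String) :=
  PySem.Dict.ofList
    [((3, 0, 0, 1, 1, 1), (1, "OK")),
     ((2, 0, 1, 1, 0, 0), (2, "PEACE")),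
     ((2, 0, 1, 0, 0, 1), (3, "ROCK")),
     ((1, 1, 0, 0, 0, 0), (4, "THUMBS-UP"))]

def detect_Hand_Gesture_alt (fingers : List Int) (total_Fingers : Int) : Int × String :=
  let pattern : Int × Int × Int × Int × Int :=
    (PySem.List.pyGetD fingers 0 0, PySem.List.pyGetD fingers 1 0, PySem.List.pyGetD fingers 2 0,
     PySem.List.pyGetD fingers 3 0, PySem.List.pyGetD fingers 4 0)
  if total_Fingers == 5 then (0, "HIGH-FIVE")
  else dhgTable.getD (total_Fingers, pattern) (-1, "")

-- ===== PRECONDITION & SPEC =====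
-- Pre_ excludes only lists of fewer than 5 elements, on which A raises IndexError (it indexes
-- fingers[0..4] eagerly while building the conditions dict); B raises IndexError there too.
def Pre_detect_Hand_Gesture (fingers : List Int) (total_Fingers : Int) : Prop :=
  5 ≤ fingers.length
instance (fingers : List Int) (total_Fingers : Int) : Decidable (Pre_detect_Hand_Gesture fingers total_Fingers) := by unfold Pre_detect_Hand_Gesture; infer_instance

def pvWitness_detect_Hand_Gesture : List Int × Int := ([0, 1, 1, 0, 0], 2)

-- On inputs with ≥ 5 fingers where total_Fingers == 1, fingers[0] == 1, fingers[1] == 0 but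
-- fingers[2..4] not all 0, A returns (4, "THUMBS-UP") because its condition list repeats
-- fingers[1] == 0 four times instead of checking fingers[2..4]; B returns (-1, ""), the intended
-- value, since the pattern is not a thumbs-up.
def D_detect_Hand_Gesture (fingers : List Int) (total_Fingers : Int) : Prop :=
  5 ≤ fingers.length ∧ total_Fingers = 1 ∧ fingers.getD 0 0 = 1 ∧ fingers.getD 1 0 = 0 ∧
    ¬ (fingers.getD 2 0 = 0 ∧ fingers.getD 3 0 = 0 ∧ fingers.getD 4 0 = 0)
instance (fingers : List Int) (total_Fingers : Int) : Decidable (D_detect_Hand_Gesture fingers total_Fingers) := by unfold D_detect_Hand_Gesture; infer_instance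

def Spec_detect_Hand_Gesture (fingers : List Int) (total_Fingers : Int) (out : Int × String) : Prop := ¬ D_detect_Hand_Gesture fingers total_Fingers → out = detect_Hand_Gesture_alt fingers total_Fingers
instance (fingers : List Int) (total_Fingers : Int) (out : Int × String) : Decidable (Spec_detect_Hand_Gesture fingers total_Fingers out) := by unfold Spec_detect_Hand_Gesture; infer_instance

def pvDiffWitness_detect_Hand_Gesture : List Int × Int := ([1, 0, 1, 0, 0], 1)
def pvDiffWitnessOut_detect_Hand_Gesture : (Int × String) × (Int × String) := ((4, "THUMBS-UP"), (-1, ""))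

-- ===== CLAIM (what is proved, stated in full; the proofs are below) =====
def Claim_unchanged_detect_Hand_Gesture : Prop := ∀ (fingers : List Int) (total_Fingers : Int), Dom_detect_Hand_Gesture fingers total_Fingers → Pre_detect_Hand_Gesture fingers total_Fingers → Spec_detect_Hand_Gesture fingers total_Fingers (detect_Hand_Gesture fingers total_Fingers)
def Claim_changed_detect_Hand_Gesture : Prop := Dom_detect_Hand_Gesture (pvDiffWitness_detect_Hand_Gesture.1) (pvDiffWitness_detect_Hand_Gesture.2) ∧ Pre_detect_Hand_Gesture (pvDiffWitness_detect_Hand_Gesture.1) (pvDiffWitness_detect_Hand_Gesture.2) ∧ D_detect_Hand_Gesture (pvDiffWitness_detect_Hand_Gesture.1) (pvDiffWitness_detect_Hand_Gesture.2) ∧ detect_Hand_Gesture (pvDiffWitness_detect_Hand_Gesture.1) (pvDiffWitness_detect_Hand_Gesture.2) = pvDiffWitnessOut_detect_Hand_Gesture.1 ∧ detect_Hand_Gesture_alt (pvDiffWitness_detect_Hand_Gesture.1) (pvDiffWitness_detect_Hand_Gesture.2) = pvDiffWitnessOut_detect_Hand_Gesture.2 ∧ pvDiffWitnessOut_detect_Hand_Gesture.1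 ≠ pvDiffWitnessOut_detect_Hand_Gesture.2
def Claim_exact_detect_Hand_Gesture : Prop := ∀ (fingers : List Int) (total_Fingers : Int), Dom_detect_Hand_Gesture fingers total_Fingers → Pre_detect_Hand_Gesture fingers total_Fingers → D_detect_Hand_Gesture fingers total_Fingers → detect_Hand_Gesture fingers total_Fingers ≠ detect_Hand_Gesture_alt fingers total_Fingers

-- ===== LEMMAS AND PROOFS =====
theorem gd0 (a b c d e : Int) (rest : List Int) :
    PySem.List.pyGetD (a :: b :: c :: d :: e :: rest) 0 0 = a := by
  simp only [PySem.List.pyGetD, PySem.List.pyGet?, PySem.List.pyIdx?]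
  split_ifs <;> simp_all <;> omega
theorem gd1 (a b c d e : Int) (rest : List Int) :
    PySem.List.pyGetD (a :: b :: c :: d :: e :: rest) 1 0 = b := by
  simp only [PySem.List.pyGetD, PySem.List.pyGet?, PySem.List.pyIdx?]
  split_ifs <;> simp_all <;> omega
theorem gd2 (a b c d e : Int) (rest : List Int) :
    PySem.List.pyGetD (a :: b :: c :: d :: e :: rest) 2 0 = c := by
  simp only [PySem.List.pyGetD, PySem.List.pyGet?, PySem.List.pyIdx?]
  split_ifs <;> simp_all <;> omega
theorem gd3 (a b c d e : Int) (rest : List Int) :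
    PySem.List.pyGetD (a :: b :: c :: d :: e :: rest) 3 0 = d := by
  simp only [PySem.List.pyGetD, PySem.List.pyGet?, PySem.List.pyIdx?]
  split_ifs <;> simp_all <;> omega
theorem gd4 (a b c d e : Int) (rest : List Int) :
    PySem.List.pyGetD (a :: b :: c :: d :: e :: rest) 4 0 = e := by
  simp only [PySem.List.pyGetD, PySem.List.pyGet?, PySem.List.pyIdx?]
  split_ifs <;> simp_all <;> omega
theorem dhgTable_eq : dhgTable = PySem.Dict.mk
    [((3, 0, 0, 1, 1, 1), (1, "OK")), ((2, 0, 1, 1, 0, 0), (2, "PEACE")),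
     ((2, 0, 1, 0, 0, 1), (3, "ROCK")), ((1, 1, 0, 0, 0, 0), (4, "THUMBS-UP"))] := by
  decide

theorem dhgGet?_nil (x : (Int × Int × Int × Int × Int × Int)) :
    (PySem.Dict.mk ([] : List ((Int × Int × Int × Int × Int × Int) × (Int × String)))).get? x
      = none := rfl

theorem A_char (a b c d e t : Int) (rest : List Int) :
    detect_Hand_Gesture (a :: b :: c :: d :: e :: rest) t =
      if t = 5 then (0, "HIGH-FIVE")
      else if t = 3 ∧ a = 0 ∧ b = 0 ∧ c = 1 ∧ d = 1 ∧ e = 1 then (1, "OK")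
      else if t = 2 ∧ a = 0 ∧ b = 1 ∧ c = 1 ∧ d = 0 ∧ e = 0 then (2, "PEACE")
      else if t = 2 ∧ a = 0 ∧ b = 1 ∧ c = 0 ∧ d = 0 ∧ e = 1 then (3, "ROCK")
      else if t = 1 ∧ a = 1 ∧ b = 0 then (4, "THUMBS-UP")
      else (-1, "") := by
  simp only [detect_Hand_Gesture, dhgConditions, dhgLoop, List.all_cons, List.all_nil, id,
    gd0, gd1, gd2, gd3, gd4, Bool.and_true, Bool.and_eq_true, beq_iff_eq, and_self]
  norm_num

theorem key_iff (t a b c d e x y z u v w : Int) :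
    (((x, y, z, u, v, w) : Int × Int × Int × Int × Int × Int) = (t, a, b, c, d, e))
      ↔ (t = x ∧ a = y ∧ b = z ∧ c = u ∧ d = v ∧ e = w) := by
  simp [Prod.ext_iff, eq_comm]

theorem B_char (a b c d e t : Int) (rest : List Int) :
    detect_Hand_Gesture_alt (a :: b :: c :: d :: e :: rest) t =
      if t = 5 then (0, "HIGH-FIVE")
      else if t = 3 ∧ a = 0 ∧ b = 0 ∧ c = 1 ∧ d = 1 ∧ e = 1 then (1, "OK")
      else if t = 2 ∧ a = 0 ∧ b = 1 ∧ c = 1 ∧ d = 0 ∧ e = 0 then (2, "PEACE")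
      else if t = 2 ∧ a = 0 ∧ b = 1 ∧ c = 0 ∧ d = 0 ∧ e = 1 then (3, "ROCK")
      else if t = 1 ∧ a = 1 ∧ b = 0 ∧ c = 0 ∧ d = 0 ∧ e = 0 then (4, "THUMBS-UP")
      else (-1, "") := by
  simp only [detect_Hand_Gesture_alt, gd0, gd1, gd2, gd3, gd4, dhgTable_eq, PySem.Dict.getD,
    PySem.Dict.get?_mk_cons, dhgGet?_nil, beq_iff_eq, key_iff]
  split_ifs <;> rfl

theorem dhg_main (a b c d e : Int) (rest : List Int) (total_Fingers : Int)
    (hnd : ¬ D_detect_Hand_Gesture (a :: b :: c :: d :: e :: rest) total_Fingers) :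
    detect_Hand_Gesture (a :: b :: c :: d :: e :: rest) total_Fingers
      = detect_Hand_Gesture_alt (a :: b :: c :: d :: e :: rest) total_Fingers := by
  rw [A_char, B_char]
  split_ifs with h1 h2 h3 h4 h5 h6 <;> try rfl
  · -- A fires THUMBS-UP but B does not: then D_ holds, contradicting hnd
    exact absurd ⟨by simp, h5.1, h5.2.1, h5.2.2,
      fun hall => h6 ⟨h5.1, h5.2.1, h5.2.2, hall.1, hall.2.1, hall.2.2⟩⟩ hnd
  · -- B fires THUMBS-UP but A does not: impossible, B's condition implies A's
    rename_i hB
    exact absurd ⟨hB.1, hB.2.1, hB.2.2.1⟩ h5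

-- ===== VERDICT (by name: the statement is the Claim_ definition above) =====
theorem detect_Hand_Gesture_spec : Claim_unchanged_detect_Hand_Gesture := by
  intro fingers total_Fingers _hdom hpre hnd
  match fingers, hpre with
  | a :: b :: c :: d :: e :: rest, _ => exact dhg_main a b c d e rest total_Fingers hnd

theorem detect_Hand_Gesture_changed : Claim_changed_detect_Hand_Gesture := by
  unfold Claim_changed_detect_Hand_Gesture; decide

theorem detect_Hand_Gesture_tight : Claim_exact_detect_Hand_Gesture := by
  intro fingers total_Fingers _hdom hpre hd
  match fingers, hpre with
  | a :: b :: c :: d :: e :: rest, _ =>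
    obtain ⟨-, rfl, h0, h1, h234⟩ := hd
    have ha : a = 1 := h0
    have hb : b = 0 := h1
    rw [A_char, B_char]
    rw [if_neg (by omega), if_neg (by rintro ⟨h, -⟩; omega),
      if_neg (by rintro ⟨h, -⟩; omega), if_neg (by rintro ⟨h, -⟩; omega),
      if_pos ⟨rfl, ha, hb⟩,
      if_neg (by omega), if_neg (by rintro ⟨h, -⟩; omega),
      if_neg (by rintro ⟨h, -⟩; omega), if_neg (by rintro ⟨h, -⟩; omega),
      if_neg (fun h => h234 ⟨h.2.2.2.1, h.2.2.2.2.1, h.2.2.2.2.2⟩)]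
    simp
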